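-- pv_equiv track=rewrite | github.com/jayl2sw/TIL | algorithm/0217/4865_글자수/4865_글자수.py | mode_char
-- ===== SOURCE A (Python) =====
-- def mode_char(candidate, arr):
--     result = 0
--     for char in candidate:
--         count = 0
--         for ch in arr:
--             if char == ch:
--                 count += 1
--         if result < count:
--             result = count
--     return result
-- ===== SOURCE B (Python) =====
-- def mode_char(candidate, arr):
--     cand = set(candidate)
--     counts = {}
--     result = 0
--     for ch in arr:
--         if ch in cand:
--             c = counts.get(ch, 0) + 1
--             counts[ch] = c
--             if c > result:
--                 result = c
--     return result
-- ===== Notes on version B (the rewrite author's own statement) =====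
-- stated objective: faster
-- what changed: Replaces the nested loop (for each candidate char, scan all of arr) by a single pass over arr with a set of candidates and a counts dict, updating a running maximum.
import Mathlib
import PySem

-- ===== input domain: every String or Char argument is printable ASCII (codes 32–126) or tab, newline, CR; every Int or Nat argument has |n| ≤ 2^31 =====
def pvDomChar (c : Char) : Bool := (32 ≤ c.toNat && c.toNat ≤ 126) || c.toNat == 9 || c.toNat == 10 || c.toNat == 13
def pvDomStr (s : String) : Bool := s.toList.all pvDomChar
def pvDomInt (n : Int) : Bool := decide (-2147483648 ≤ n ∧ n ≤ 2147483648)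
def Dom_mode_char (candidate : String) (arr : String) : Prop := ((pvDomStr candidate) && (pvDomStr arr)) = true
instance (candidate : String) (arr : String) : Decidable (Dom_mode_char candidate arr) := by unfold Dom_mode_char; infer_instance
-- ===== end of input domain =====

-- B replaces A's nested scan (per candidate char, scan all of arr) by one pass over arr
-- with a candidate set and a counts dict, keeping a running maximum: asymptotically faster.


-- ===== PORT A =====
def mode_char (candidate : String) (arr : String) : Int :=
  candidate.toList.foldl
    (fun result char =>
      let count := arr.toList.foldl
        (fun count ch => if char == ch then count + 1 else count) (0 : Int)
      if result < count then count else result) 0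

-- ===== PORT B =====
def mode_char_alt (candidate : String) (arr : String) : Int :=
  let cand : PySem.Set Char := PySem.Set.ofList candidate.toList
  (arr.toList.foldl
    (fun (st : PySem.Dict Char Int × Int) ch =>
      if PySem.Set.contains cand ch then
        let c := st.1.getD ch 0 + 1
        (st.1.insert ch c, if c > st.2 then c else st.2)
      else st)
    (PySem.Dict.empty, 0)).2

-- ===== PRECONDITION & SPEC =====
def Spec_mode_char (candidate : String) (arr : String) (out : Int) : Prop := out = mode_char_alt candidate arr
instance (candidate : String) (arr : String) (out : Int) : Decidable (Spec_mode_char candidate arr out) := by unfold Spec_mode_char; infer_instance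

-- ===== CLAIM (what is proved, stated in full; the proofs are below) =====
def Claim_equal_mode_char : Prop := ∀ (candidate : String) (arr : String), Dom_mode_char candidate arr → Spec_mode_char candidate arr (mode_char candidate arr)

-- ===== LEMMAS AND PROOFS =====

-- number of occurrences of c in arr, as an Int
def pvCnt (arr : List Char) (c : Char) : Int := arr.count c

-- A's outer-loop step, with the inner counting loop replaced by its value
def pvStepA (arr : List Char) (r : Int) (char : Char) : Int :=
  if r < pvCnt arr char then pvCnt arr char else r

-- B's loop step
def pvStepB (S : PySem.Set Char) (st : PySem.Dict Char Int × Int) (ch : Char) :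
    PySem.Dict Char Int × Int :=
  if PySem.Set.contains S ch then
    let c := st.1.getD ch 0 + 1
    (st.1.insert ch c, if c > st.2 then c else st.2)
  else st

-- A's inner loop computes the occurrence count
theorem pvInner (char : Char) :
    ∀ (l : List Char) (k : Int),
      l.foldl (fun count ch => if char == ch then count + 1 else count) k
        = k + l.count char := by
  intro l
  induction l with
  | nil => intro k; simp
  | cons a t ih =>
    intro k
    by_cases h : char = a
    · subst h
      have hb : (char == char) = true := by simp
      simp only [List.foldl_cons, hb, if_true, List.count_cons]
      rw [ih]
      push_cast
      ring
    · have hb : (char == a) = false := by simp [h]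
      have hb2 : (a == char) = false := by simp [Ne.symm h]
      simp only [List.foldl_cons, hb, List.count_cons, hb2]
      rw [ih]
      push_cast
      ring

theorem pvA_ge (arr : List Char) :
    ∀ (L : List Char) (r : Int), r ≤ L.foldl (pvStepA arr) r := by
  intro L
  induction L with
  | nil => intro r; simp
  | cons a t ih =>
    intro r
    simp only [List.foldl_cons]
    refine le_trans ?_ (ih _)
    unfold pvStepA
    split <;> omega

theorem pvA_mem (arr : List Char) :
    ∀ (L : List Char) (r : Int) (c : Char), c ∈ L →
      pvCnt arr c ≤ L.foldl (pvStepA arr) r := by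
  intro L
  induction L with
  | nil => intro r c hc; simp at hc
  | cons a t ih =>
    intro r c hc
    simp only [List.foldl_cons]
    rcases List.mem_cons.mp hc with h | h
    · subst h
      refine le_trans ?_ (pvA_ge arr t _)
      unfold pvStepA
      split <;> omega
    · exact ih _ c h

theorem pvA_wit (arr : List Char) :
    ∀ (L : List Char) (r : Int),
      L.foldl (pvStepA arr) r = r ∨ ∃ c ∈ L, L.foldl (pvStepA arr) r = pvCnt arr c := by
  intro L
  induction L with
  | nil => intro r; left; rfl
  | cons a t ih =>
    intro r
    simp only [List.foldl_cons]
    rcases ih (pvStepA arr r a) with h | h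
    · rw [h]
      unfold pvStepA
      split
      · right; exact ⟨a, List.mem_cons_self, rfl⟩
      · left; rfl
    · rcases h with ⟨c, hc, hv⟩
      right; exact ⟨c, List.mem_cons_of_mem _ hc, hv⟩

-- B's loop invariant: f records the counts so far, r the running maximum
theorem pvB_inv (S : PySem.Set Char) :
    ∀ (l : List Char) (d : PySem.Dict Char Int) (r : Int) (f : Char → Int),
      (∀ c ∈ S, d.getD c 0 = f c) → 0 ≤ r → (∀ c ∈ S, f c ≤ r) →
      (r = 0 ∨ ∃ c ∈ S, r = f c) →
      0 ≤ (l.foldl (pvStepB S) (d, r)).2 ∧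
      (∀ c ∈ S, f c + l.count c ≤ (l.foldl (pvStepB S) (d, r)).2) ∧
      ((l.foldl (pvStepB S) (d, r)).2 = 0 ∨
        ∃ c ∈ S, (l.foldl (pvStepB S) (d, r)).2 = f c + l.count c) := by
  intro l
  induction l with
  | nil =>
    intro d r f h1 h2 h3 h4
    refine ⟨h2, ?_, ?_⟩
    · intro c hc; simpa using h3 c hc
    · rcases h4 with h | ⟨c, hc, hv⟩
      · exact Or.inl h
      · exact Or.inr ⟨c, hc, by simpa using hv⟩
  | cons a t ih =>
    intro d r f h1 h2 h3 h4
    simp only [List.foldl_cons]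
    by_cases ha : a ∈ S
    · have hca : PySem.Set.contains S a = true := (PySem.Set.contains_iff S a).mpr ha
      have hstep : pvStepB S (d, r) a
          = (d.insert a (f a + 1), if f a + 1 > r then f a + 1 else r) := by
        unfold pvStepB
        rw [hca]
        simp [h1 a ha]
      rw [hstep]
      have hmain := ih (d.insert a (f a + 1)) (if f a + 1 > r then f a + 1 else r)
        (fun c => if c = a then f c + 1 else f c)
        (by
          intro c hc
          rw [PySem.Dict.getD_insert]
          split <;> simp_all)
        (by split <;> omega)
        (by
          intro c hc
          by_cases hce : c = a
          · subst hce; simp only [if_true]; split <;> omega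
          · simp only [if_neg hce]
            have := h3 c hc
            split <;> omega)
        (by
          by_cases hgt : f a + 1 > r
          · right
            exact ⟨a, ha, by simp [hgt]⟩
          · simp only [if_neg hgt]
            rcases h4 with h | ⟨c, hc, hv⟩
            · exact Or.inl h
            · right
              refine ⟨c, hc, ?_⟩
              have hcne : c ≠ a := by
                intro he; subst he
                have := h3 c hc
                omega
              simp [hcne, hv])
      refine ⟨hmain.1, ?_, ?_⟩
      · intro c hc
        have := hmain.2.1 c hc
        by_cases hce : c = a
        · subst hce
          simp only [if_true] at this
          rw [List.count_cons]
          have hbeq : (c == c) = true := by simp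
          rw [hbeq]
          simp only [if_true]
          push_cast
          omega
        · simp only [if_neg hce] at this
          rw [List.count_cons]
          have hne : (a == c) = false := by simp [Ne.symm hce]
          rw [hne]
          simpa using this
      · rcases hmain.2.2 with h | ⟨c, hc, hv⟩
        · exact Or.inl h
        · right
          refine ⟨c, hc, ?_⟩
          rw [List.count_cons]
          by_cases hce : c = a
          · subst hce
            simp only [if_true] at hv
            have hbeq : (c == c) = true := by simp
            rw [hbeq]
            simp only [if_true]
            push_cast
            omega
          · simp only [if_neg hce] at hv
            have hne : (a == c) = false := by simp [Ne.symm hce]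
            rw [hne]
            simpa using hv
    · have hca : PySem.Set.contains S a = false := by
        by_contra h
        exact ha ((PySem.Set.contains_iff S a).mp (by simpa using h))
      have hstep : pvStepB S (d, r) a = (d, r) := by unfold pvStepB; rw [hca]; simp
      rw [hstep]
      have hmain := ih d r f h1 h2 h3 h4
      refine ⟨hmain.1, ?_, ?_⟩
      · intro c hc
        have hcne : c ≠ a := fun he => ha (he ▸ hc)
        have hne : (a == c) = false := by simp [Ne.symm hcne]
        rw [List.count_cons, hne]
        simpa using hmain.2.1 c hc
      · rcases hmain.2.2 with h | ⟨c, hc, hv⟩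
        · exact Or.inl h
        · right
          refine ⟨c, hc, ?_⟩
          have hcne : c ≠ a := fun he => ha (he ▸ hc)
          have hne : (a == c) = false := by simp [Ne.symm hcne]
          rw [List.count_cons, hne]
          simpa using hv

-- ===== VERDICT (by name: the statement is the Claim_ definition above) =====
theorem mode_char_spec : Claim_equal_mode_char := by
  intro candidate arr _
  unfold Spec_mode_char
  -- A's result, with the inner loop rewritten to the occurrence count
  have hA : mode_char candidate arr
      = candidate.toList.foldl (pvStepA arr.toList) 0 := by
    unfold mode_char
    congr 1
    funext r c
    rw [pvInner]
    unfold pvStepA pvCnt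
    simp
  have hB : mode_char_alt candidate arr
      = (arr.toList.foldl (pvStepB (PySem.Set.ofList candidate.toList))
          (PySem.Dict.empty, 0)).2 := rfl
  have hBinv := pvB_inv (PySem.Set.ofList candidate.toList) arr.toList
    PySem.Dict.empty 0 (fun _ => (0 : Int))
    (by intro c hc; simp [PySem.Dict.getD, PySem.Dict.get?, PySem.Dict.empty])
    le_rfl (fun c hc => le_rfl) (Or.inl rfl)
  have hmem : ∀ c : Char, c ∈ PySem.Set.ofList candidate.toList ↔ c ∈ candidate.toList := by
    intro c; rw [PySem.Set.mem_ofList]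
  rw [hA, hB]
  refine le_antisymm ?_ ?_
  · rcases pvA_wit arr.toList candidate.toList 0 with h | ⟨c, hc, hv⟩
    · rw [h]; exact hBinv.1
    · rw [hv]
      have := hBinv.2.1 c ((hmem c).mpr hc)
      simpa [pvCnt] using this
  · rcases hBinv.2.2 with h | ⟨c, hc, hv⟩
    · rw [h]; exact pvA_ge arr.toList candidate.toList 0
    · rw [hv]
      have := pvA_mem arr.toList candidate.toList 0 c ((hmem c).mp hc)
      simpa [pvCnt] using this
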